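-- pv_equiv track=rewrite | github.com/Surafel13/Python-Problem-Solutions | ListPy/NumberIntersection.py | NumberIntersection
-- ===== SOURCE A (Python) =====
-- def NumberIntersection(ls1, ls2):
--     hash1 = {}
--
--     for i , num in enumerate(ls1):
--         if not num in hash1:
--             hash1[num] = i
--     outPut = []
--     for i in ls2:
--         if i in hash1:
--             if i in outPut:
--                 continue
--             outPut.append(i)
--
--     return outPut
-- ===== SOURCE B (Python) =====
-- def NumberIntersection(ls1, ls2):
--     # first-occurrence index of every value of ls2: reversed overwrite, smallest index wins
--     first = {x: i for i, x in reversed(list(enumerate(ls2)))}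
--     return sorted(set(ls1) & set(ls2), key=lambda x: first[x])
-- ===== Notes on version B (the rewrite author's own statement) =====
-- stated objective: faster
-- what changed: Instead of A's ordered filtering pass over ls2 (hash of ls1 plus an inline linear 'i in outPut' scan per kept element), B computes the unordered set intersection set(ls1) & set(ls2) and reconstructs A's output order by sorting it on the first-occurrence index of each value in ls2 (built by a reversed overwriting dict comprehension); correct because A's output is exactly the common values ordered by first appearance in ls2.
import Mathlib
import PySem

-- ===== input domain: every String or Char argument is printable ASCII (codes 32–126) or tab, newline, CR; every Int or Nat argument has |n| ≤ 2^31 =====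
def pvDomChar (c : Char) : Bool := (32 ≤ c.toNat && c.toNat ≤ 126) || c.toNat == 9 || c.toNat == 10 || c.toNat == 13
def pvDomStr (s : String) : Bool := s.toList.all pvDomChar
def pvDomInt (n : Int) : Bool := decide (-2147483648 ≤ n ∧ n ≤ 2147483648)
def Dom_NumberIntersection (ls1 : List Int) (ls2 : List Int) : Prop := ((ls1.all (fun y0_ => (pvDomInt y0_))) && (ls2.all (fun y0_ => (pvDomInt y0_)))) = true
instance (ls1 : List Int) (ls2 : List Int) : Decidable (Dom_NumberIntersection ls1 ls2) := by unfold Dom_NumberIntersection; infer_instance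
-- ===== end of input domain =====

-- B replaces A's ordered filtering pass over ls2 (hash of ls1, inline 'already in output'
-- scan) by the unordered set intersection set(ls1) & set(ls2), re-ordered by sorting on the
-- first-occurrence index of each value in ls2; objective: alternative.

-- ===== PORT A =====
def NumberIntersection (ls1 : List Int) (ls2 : List Int) : List Int :=
  let hash1 : PySem.Dict Int Int :=
    (PySem.List.enumerate ls1).foldl
      (fun d p => if d.contains p.2 then d else d.insert p.2 p.1) PySem.Dict.empty
  let outPut : List Int :=
    ls2.foldl
      (fun out i =>
        if hash1.contains i then (if out.contains i then out else out ++ [i]) else out) []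
  outPut

-- ===== PORT B =====
def NumberIntersection_alt (ls1 : List Int) (ls2 : List Int) : List Int :=
  -- {x: i for i, x in reversed(list(enumerate(ls2)))}: overwriting backwards, smallest index wins
  let first : PySem.Dict Int Int :=
    ((PySem.List.enumerate ls2).reverse).foldl (fun d p => d.insert p.2 p.1) PySem.Dict.empty
  -- key=lambda x: first[x]: every sorted element is in ls2, hence a key of first, so the
  -- getD default 0 is never consulted — exact on the domain
  PySem.List.sorted (PySem.Set.inter (PySem.Set.ofList ls1) (PySem.Set.ofList ls2))
    (fun x => first.getD x 0) false

-- ===== PRECONDITION & SPEC =====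
def Spec_NumberIntersection (ls1 : List Int) (ls2 : List Int) (out : List Int) : Prop := out = NumberIntersection_alt ls1 ls2
instance (ls1 : List Int) (ls2 : List Int) (out : List Int) : Decidable (Spec_NumberIntersection ls1 ls2 out) := by unfold Spec_NumberIntersection; infer_instance

-- ===== CLAIM (what is proved, stated in full; the proofs are below) =====
def Claim_equal_NumberIntersection : Prop := ∀ (ls1 : List Int) (ls2 : List Int), Dom_NumberIntersection ls1 ls2 → Spec_NumberIntersection ls1 ls2 (NumberIntersection ls1 ls2)

-- ===== LEMMAS AND PROOFS =====

-- A's ls2 loop, as a recursion on the remaining list (acc = outPut so far).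
def pvDdf (p : Int → Bool) (acc : List Int) : List Int → List Int
  | [] => []
  | i :: t => if p i = true ∧ i ∉ acc then i :: pvDdf p (acc ++ [i]) t else pvDdf p acc t

-- dedup-with-seen recursion (A's dedup discipline).
def pvDd (seen : List Int) : List Int → List Int
  | [] => []
  | i :: t => if i ∈ seen then pvDd seen t else i :: pvDd (seen ++ [i]) t

-- first-occurrence list by deleting later duplicates of the head.
def pvNub : List Int → List Int
  | [] => []
  | h :: t => h :: pvNub (t.filter (fun y => y != h))
termination_by l => l.length
decreasing_by
  rw [List.length_unattach]
  exact Nat.lt_succ_of_le (le_trans (List.length_filter_le _ _) (le_of_eq List.length_attach))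

theorem pvFoldlA_eq_ddf (p : Int → Bool) (l acc : List Int) :
    l.foldl (fun out i => if p i then (if out.contains i then out else out ++ [i]) else out) acc
      = acc ++ pvDdf p acc l := by
  induction l generalizing acc with
  | nil => simp [pvDdf]
  | cons i t ih =>
    simp only [List.foldl_cons, pvDdf]
    by_cases hp : p i = true
    · by_cases hc : i ∈ acc
      · have hc' : acc.contains i = true := by simpa using hc
        rw [if_pos hp, if_pos hc', if_neg (fun h => h.2 hc)]
        exact ih acc
      · have hc' : acc.contains i = false := by simpa using hc
        rw [if_pos hp, if_neg (by simpa using hc), if_pos (And.intro hp hc), ih (acc ++ [i]),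
          List.append_assoc]
        rfl
    · rw [if_neg hp, if_neg (fun h => hp h.1)]
      exact ih acc

theorem pvDdf_eq_filter_dd (p : Int → Bool) (l acc seen : List Int)
    (h : ∀ x, p x = true → (x ∈ acc ↔ x ∈ seen)) :
    pvDdf p acc l = (pvDd seen l).filter p := by
  induction l generalizing acc seen with
  | nil => simp [pvDdf, pvDd]
  | cons i t ih =>
    simp only [pvDdf, pvDd]
    by_cases hp : p i = true
    · by_cases hs : i ∈ seen
      · have ha : i ∈ acc := (h i hp).mpr hs
        rw [if_pos hs, if_neg (fun hq => hq.2 ha)]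
        exact ih acc seen h
      · have ha : i ∉ acc := fun hm => hs ((h i hp).mp hm)
        rw [if_neg hs, if_pos (And.intro hp ha), List.filter_cons_of_pos hp]
        refine congrArg (i :: ·) (ih (acc ++ [i]) (seen ++ [i]) ?_)
        intro x hx
        simp [List.mem_append, h x hx]
    · have hp' : p i = false := by simpa using hp
      by_cases hs : i ∈ seen
      · rw [if_pos hs, if_neg (fun hq => hp hq.1)]
        exact ih acc seen h
      · rw [if_neg hs, if_neg (fun hq => hp hq.1),
          List.filter_cons_of_neg (by simp [hp'])]
        refine ih acc (seen ++ [i]) ?_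
        intro x hx
        have hne : x ≠ i := fun he => by rw [he] at hx; exact absurd hx (by simp [hp'])
        simp [List.mem_append, h x hx, hne]

theorem pvDd_eq_nub (l seen : List Int) :
    pvDd seen l = pvNub (l.filter (fun x => !seen.contains x)) := by
  induction l generalizing seen with
  | nil => simp [pvDd, pvNub]
  | cons h t ih =>
    simp only [pvDd]
    by_cases hm : h ∈ seen
    · rw [if_pos hm, List.filter_cons_of_neg (by simpa using hm)]
      exact ih seen
    · rw [if_neg hm, List.filter_cons_of_pos (by simpa using hm), pvNub, ih (seen ++ [h])]
      have hf : (t.filter (fun x => !seen.contains x)).filter (fun y => y != h)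
          = t.filter (fun x => !(seen ++ [h]).contains x) := by
        simp only [List.filter_filter]
        apply List.filter_congr
        intro x _
        by_cases h1 : x ∈ seen <;> by_cases h2 : x = h <;> simp [h1, h2]
      rw [hf]

theorem pvNub_mem (l : List Int) (x : Int) : x ∈ pvNub l ↔ x ∈ l := by
  induction l using pvNub.induct with
  | case1 => simp [pvNub]
  | case2 h t ih =>
    simp only [List.unattach_filter, List.unattach_attach] at ih
    rw [pvNub]
    simp only [List.mem_cons, ih, List.mem_filter]
    by_cases hx : x = h <;> simp [hx]

theorem pvNub_nodup (l : List Int) : (pvNub l).Nodup := by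
  induction l using pvNub.induct with
  | case1 => simp [pvNub]
  | case2 h t ih =>
    simp only [List.unattach_filter, List.unattach_attach] at ih
    rw [pvNub]
    refine List.nodup_cons.mpr ⟨?_, ih⟩
    intro hm
    have := (List.mem_filter.mp ((pvNub_mem _ h).mp hm)).2
    simp at this

theorem pvIdxOf_filter_mono (q : Int → Bool) (l : List Int) (a b : Int)
    (ha : a ∈ l.filter q) (hb : b ∈ l.filter q)
    (h : List.idxOf a (l.filter q) < List.idxOf b (l.filter q)) :
    List.idxOf a l < List.idxOf b l := by
  induction l with
  | nil => simp at ha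
  | cons c t ih =>
    by_cases hq : q c = true
    · rw [List.filter_cons_of_pos hq] at ha hb h
      by_cases hca : c = a
      · subst hca
        have hbc : b ≠ c := by
          intro hbc
          subst hbc
          simp [List.idxOf_cons_self] at h
        rw [List.idxOf_cons_self, List.idxOf_cons_ne t (fun he => hbc he.symm)]
        omega
      · by_cases hcb : c = b
        · subst hcb
          rw [List.idxOf_cons_self] at h
          omega
        · rw [List.idxOf_cons_ne _ hca, List.idxOf_cons_ne _ hcb] at h
          rw [List.idxOf_cons_ne t hca, List.idxOf_cons_ne t hcb]
          have ha' : a ∈ t.filter q := by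
            rcases List.mem_cons.mp ha with h1 | h1
            · exact absurd h1.symm hca
            · exact h1
          have hb' : b ∈ t.filter q := by
            rcases List.mem_cons.mp hb with h1 | h1
            · exact absurd h1.symm hcb
            · exact h1
          have := ih ha' hb' (by omega)
          omega
    · have hq' : q c = false := by simpa using hq
      rw [List.filter_cons_of_neg (by simp [hq'])] at ha hb h
      have hca : c ≠ a := by
        intro he
        have := (List.mem_filter.mp ha).2
        rw [← he] at this
        simp [hq'] at this
      have hcb : c ≠ b := by
        intro he
        have := (List.mem_filter.mp hb).2
        rw [← he] at this
        simp [hq'] at this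
      rw [List.idxOf_cons_ne t hca, List.idxOf_cons_ne t hcb]
      have := ih ha hb h
      omega

theorem pvNub_pairwise (l : List Int) :
    (pvNub l).Pairwise (fun a b => List.idxOf a l < List.idxOf b l) := by
  induction l using pvNub.induct with
  | case1 => simp [pvNub]
  | case2 h t ih =>
    simp only [List.unattach_filter, List.unattach_attach] at ih
    rw [pvNub]
    refine List.pairwise_cons.mpr ⟨?_, ?_⟩
    · intro b hb
      have hb' := (pvNub_mem _ b).mp hb
      have hbne : b ≠ h := by
        have := (List.mem_filter.mp hb').2
        simpa using this
      rw [List.idxOf_cons_self, List.idxOf_cons_ne t (fun he => hbne he.symm)]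
      omega
    · refine List.Pairwise.imp_of_mem ?_ ih
      intro a b ha hb hr
      have ha' := (pvNub_mem _ a).mp ha
      have hb' := (pvNub_mem _ b).mp hb
      have hane : a ≠ h := by have := (List.mem_filter.mp ha').2; simpa using this
      have hbne : b ≠ h := by have := (List.mem_filter.mp hb').2; simpa using this
      have := pvIdxOf_filter_mono (fun y => y != h) t a b ha' hb' hr
      rw [List.idxOf_cons_ne t (fun he => hane he.symm),
        List.idxOf_cons_ne t (fun he => hbne he.symm)]
      omega

-- the reversed overwriting dict: getD is the FIRST-occurrence index (offset s)
theorem pvFirst_getD (l : List Int) (s : Int) (d : PySem.Dict Int Int) (x : Int) :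
    ((PySem.List.enumerate l s).reverse.foldl (fun d p => d.insert p.2 p.1) d).getD x 0
      = if x ∈ l then s + (List.idxOf x l : Int) else d.getD x 0 := by
  induction l generalizing s d with
  | nil => simp [PySem.List.enumerate_nil]
  | cons h t ih =>
    rw [PySem.List.enumerate_cons, List.reverse_cons, List.foldl_append]
    simp only [List.foldl_cons, List.foldl_nil]
    rw [PySem.Dict.getD_insert]
    by_cases hxh : x = h
    · subst hxh
      rw [if_pos rfl, if_pos (List.mem_cons_self), List.idxOf_cons_self]
      simp
    · rw [if_neg hxh, ih (s + 1) d]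
      by_cases hxt : x ∈ t
      · rw [if_pos hxt, if_pos (List.mem_cons_of_mem _ hxt),
          List.idxOf_cons_ne t (fun he => hxh he.symm)]
        push_cast
        ring
      · rw [if_neg hxt, if_neg (by simp [hxh, hxt])]

theorem pvHash_contains (l : List (Int × Int)) (d : PySem.Dict Int Int) (x : Int) :
    (l.foldl (fun d p => if d.contains p.2 then d else d.insert p.2 p.1) d).contains x
      = (d.contains x || l.any (fun p => p.2 == x)) := by
  induction l generalizing d with
  | nil => simp
  | cons q t ih =>
    simp only [List.foldl_cons, List.any_cons]
    by_cases hc : d.contains q.2 = true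
    · rw [if_pos hc, ih]
      by_cases he : (q.2 == x) = true
      · have : d.contains x = true := by rwa [beq_iff_eq.mp he] at hc
        simp [this, he]
      · simp [Bool.eq_false_iff.mpr he]
    · rw [if_neg hc, ih, PySem.Dict.contains_insert]
      have hsym : (x == q.2) = (q.2 == x) := by
        by_cases h : x = q.2
        · rw [h]
        · rw [beq_eq_false_iff_ne.mpr h, beq_eq_false_iff_ne.mpr (fun hq => h hq.symm)]
      rw [hsym, Bool.or_assoc, Bool.or_left_comm]

theorem pvHash_contains_eq_mem (ls1 : List Int) (x : Int) :
    ((PySem.List.enumerate ls1).foldl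
      (fun d p => if d.contains p.2 then d else d.insert p.2 p.1) PySem.Dict.empty).contains x
      = ls1.contains x := by
  rw [pvHash_contains]
  have h1 : (PySem.List.enumerate ls1).any (fun p => p.2 == x) = ls1.any (· == x) := by
    conv_rhs => rw [← PySem.List.map_snd_enumerate (xs := ls1) (s := 0)]
    rw [List.any_map]
    rfl
  have h2 : ls1.any (· == x) = ls1.contains x := by
    rw [Bool.eq_iff_iff]; simp
  rw [h1, h2, PySem.Dict.contains_empty, Bool.false_or]

-- ===== VERDICT (by name: the statement is the Claim_ definition above) =====
theorem NumberIntersection_spec : Claim_equal_NumberIntersection := by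
  intro ls1 ls2 _
  show NumberIntersection ls1 ls2 = NumberIntersection_alt ls1 ls2
  unfold NumberIntersection NumberIntersection_alt
  dsimp only
  -- A's result is the first occurrences of ls2, filtered by membership in ls1
  have hA : ls2.foldl
      (fun out i =>
        if ((PySem.List.enumerate ls1).foldl
            (fun d p => if d.contains p.2 then d else d.insert p.2 p.1)
            PySem.Dict.empty).contains i then
          (if out.contains i then out else out ++ [i]) else out) []
      = (pvNub ls2).filter (fun i => ls1.contains i) := by
    rw [List.foldl_ext _ _ []
      (fun out i _ => by rw [pvHash_contains_eq_mem ls1 i]),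
      pvFoldlA_eq_ddf, List.nil_append,
      pvDdf_eq_filter_dd _ _ _ [] (by intro x _; rfl), pvDd_eq_nub]
    have : ls2.filter (fun x => !(List.contains ([] : List Int) x)) = ls2 :=
      List.filter_eq_self.mpr (by intro a _; simp)
    rw [this]
  rw [hA]
  -- B's sort reproduces exactly that list: it is a permutation of the intersection,
  -- strictly increasing under the first-occurrence key
  have hkey : ∀ a ∈ ls2,
      (((PySem.List.enumerate ls2).reverse.foldl
        (fun d p => d.insert p.2 p.1) PySem.Dict.empty).getD a 0)
        = (List.idxOf a ls2 : Int) := by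
    intro a ha
    rw [pvFirst_getD, if_pos ha]
    ring
  have hmemL : ∀ a, a ∈ (pvNub ls2).filter (fun i => ls1.contains i) ↔ (a ∈ ls1 ∧ a ∈ ls2) := by
    intro a
    simp [List.mem_filter, pvNub_mem, and_comm]
  have hnodL : ((pvNub ls2).filter (fun i => ls1.contains i)).Nodup :=
    (pvNub_nodup ls2).filter _
  have hnodC : (PySem.Set.inter (PySem.Set.ofList ls1) (PySem.Set.ofList ls2)).Nodup :=
    PySem.Set.nodup_inter _ _ (PySem.Set.nodup_ofList ls1)
  have hperm : ((pvNub ls2).filter (fun i => ls1.contains i)).Perm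
      (PySem.Set.inter (PySem.Set.ofList ls1) (PySem.Set.ofList ls2)) := by
    refine (List.perm_ext_iff_of_nodup hnodL hnodC).mpr ?_
    intro a
    rw [hmemL a, PySem.Set.mem_inter, PySem.Set.mem_ofList, PySem.Set.mem_ofList]
  have hpair : ((pvNub ls2).filter (fun i => ls1.contains i)).Pairwise
      (fun a b =>
        (((PySem.List.enumerate ls2).reverse.foldl
          (fun d p => d.insert p.2 p.1) PySem.Dict.empty).getD a 0)
        < (((PySem.List.enumerate ls2).reverse.foldl
          (fun d p => d.insert p.2 p.1) PySem.Dict.empty).getD b 0)) := by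
    refine List.Pairwise.imp_of_mem ?_ ((pvNub_pairwise ls2).filter _)
    intro a b ha hb hr
    have ha2 : a ∈ ls2 := (pvNub_mem ls2 a).mp (List.mem_filter.mp ha).1
    have hb2 : b ∈ ls2 := (pvNub_mem ls2 b).mp (List.mem_filter.mp hb).1
    rw [hkey a ha2, hkey b hb2]
    exact_mod_cast hr
  exact (PySem.List.sorted_eq_of_perm_of_pairwise_lt _ _ _ hperm hpair).symm
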